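-- pv_equiv track=rewrite | github.com/LiuJiang20/douDiZhuAI | utility.py | getTrioPairs
-- ===== SOURCE A (Python) =====
-- from typing import List, Tuple
--
-- def getPairs(hand: List[int], lastPlay=None):
--     pairs = set()
--     handSize = len(hand)
--     pos = 1
--     while pos < handSize:
--         if hand[pos] == hand[pos - 1] and (not lastPlay or hand[pos] > lastPlay[0]):
--             pairs.add((hand[pos],) * 2)
--         pos += 1
--     return sorted(list(pairs))
--
-- def getTrios(hand: List[int], lastPlay=None):
--     trios = set()
--     handSize = len(hand)
--     pos = 2
--     while pos < handSize:
--         if hand[pos] == hand[pos - 1] and hand[pos] == hand[pos - 2] and (not lastPlay or hand[pos] > lastPlay[0]):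
--             trios.add((hand[pos],) * 3)
--         pos += 1
--     return sorted(list(trios))
--
-- def getTrioPairs(hand: List[int], lastPlay=None):
--     trioSolo = []
--     if lastPlay:
--         trios = getTrios(hand, lastPlay[:3])
--     else:
--         trios = getTrios(hand)
--     for trio in trios:
--         for pair in getPairs(removeFromHand(hand, trio)):
--             trioSolo.append(trio + pair)
--     return trioSolo
--
-- def removeFromHand(hand: List[int], cards):
--     left = hand.copy()
--     for i in cards:
--         left.remove(i)
--     return left
-- ===== SOURCE B (Python) =====
-- from typing import List
--
-- def _runs(hand: List[int]):
--     """Run-length encoding of hand: list of (value, length) of maximal equal runs."""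
--     runs = []
--     cur = None
--     cnt = 0
--     for x in hand:
--         if cnt and x == cur:
--             cnt += 1
--         else:
--             if cnt:
--                 runs.append((cur, cnt))
--             cur, cnt = x, 1
--     if cnt:
--         runs.append((cur, cnt))
--     return runs
--
-- def _drop3(runs, v):
--     """Run list after deleting the first three occurrences of v, re-merged."""
--     need = 3
--     out = []
--     for val, cnt in runs:
--         if val == v and need:
--             take = cnt if cnt < need else need
--             need -= take
--             cnt -= take
--         if cnt:
--             if out and out[-1][0] == val:
--                 out[-1] = (val, out[-1][1] + cnt)
--             else:
--                 out.append((val, cnt))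
--     return out
--
-- def getTrioPairs(hand: List[int], lastPlay=None):
--     runs = _runs(hand)
--     limit = lastPlay[0] if lastPlay else None
--     trios = sorted({val for val, cnt in runs
--                     if cnt >= 3 and (limit is None or val > limit)})
--     result = []
--     for v in trios:
--         pairs = sorted({val for val, cnt in _drop3(runs, v) if cnt >= 2})
--         result.extend((v, v, v, p, p) for p in pairs)
--     return result
-- ===== Notes on version B (the rewrite author's own statement) =====
-- stated objective: alternative
-- what changed: B works on a run-length encoding built in one pass: trios are the runs of length >= 3, and for each trio the reduced hand is never materialised - three units are subtracted from the earliest v-runs of the run list and equal neighbours re-merged, pairs being the runs of length >= 2 of that run list; A instead scans the hand by index for adjacent triples, copies the hand and calls list.remove three times per trio, then rescans the copy for adjacent pairs.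
import Mathlib
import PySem

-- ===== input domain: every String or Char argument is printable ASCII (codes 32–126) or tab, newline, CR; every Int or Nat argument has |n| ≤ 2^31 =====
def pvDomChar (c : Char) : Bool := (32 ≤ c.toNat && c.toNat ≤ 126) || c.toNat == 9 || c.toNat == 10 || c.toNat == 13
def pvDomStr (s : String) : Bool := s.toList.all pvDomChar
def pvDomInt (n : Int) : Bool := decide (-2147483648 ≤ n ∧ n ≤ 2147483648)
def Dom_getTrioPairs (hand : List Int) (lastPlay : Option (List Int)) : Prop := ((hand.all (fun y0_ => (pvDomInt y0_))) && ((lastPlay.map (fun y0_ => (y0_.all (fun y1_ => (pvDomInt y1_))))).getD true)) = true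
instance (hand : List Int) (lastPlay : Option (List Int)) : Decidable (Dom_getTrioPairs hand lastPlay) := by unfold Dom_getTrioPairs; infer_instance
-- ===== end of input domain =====

-- B works on a run-length encoding of the hand built in one pass: trios are runs of length ≥ 3,
-- and the reduced hand per trio is never built — three units are subtracted from the earliest
-- v-runs and equal neighbours re-merged, pairs being runs of length ≥ 2; objective: alternative.


-- ===== PORT A =====
-- 'not lastPlay or v > lastPlay[0]' (lastPlay[0] is only read when lastPlay is truthy)
def pairCondA (lastPlay : Option (List Int)) (v : Int) : Bool :=
  match lastPlay with
  | none => true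
  | some [] => true
  | some (h :: _) => decide (v > h)

-- A's tuples (v,)*2 / (v,)*3 have equal components, so each is represented by its value v and
-- sorted() on the tuples is sorted() on the values; the k copies are re-expanded in getTrioPairs.
def getPairsA (hand : List Int) (lastPlay : Option (List Int)) : List Int :=
  let handSize : Int := PySem.List.len hand
  let pairs : PySem.Set Int :=
    (PySem.List.pyRange 1 handSize 1).foldl
      (fun s pos =>
        -- indices pos, pos-1 are in range here, so the default 0 of pyGetD is never used
        if PySem.List.pyGetD hand pos 0 = PySem.List.pyGetD hand (pos - 1) 0 ∧
           pairCondA lastPlay (PySem.List.pyGetD hand pos 0) = true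
        then PySem.Set.add s (PySem.List.pyGetD hand pos 0) else s)
      PySem.Set.empty
  PySem.List.sorted pairs (fun x => x) false

def getTriosA (hand : List Int) (lastPlay : Option (List Int)) : List Int :=
  let handSize : Int := PySem.List.len hand
  let trios : PySem.Set Int :=
    (PySem.List.pyRange 2 handSize 1).foldl
      (fun s pos =>
        if PySem.List.pyGetD hand pos 0 = PySem.List.pyGetD hand (pos - 1) 0 ∧
           PySem.List.pyGetD hand pos 0 = PySem.List.pyGetD hand (pos - 2) 0 ∧
           pairCondA lastPlay (PySem.List.pyGetD hand pos 0) = true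
        then PySem.Set.add s (PySem.List.pyGetD hand pos 0) else s)
      PySem.Set.empty
  PySem.List.sorted trios (fun x => x) false

-- left.remove(i); on every call A makes, i occurs in left, so remove never raises and .getD left is never used
def removeFromHandA (hand : List Int) (cards : List Int) : List Int :=
  cards.foldl (fun left i => (PySem.List.remove? left i).getD left) hand

def getTrioPairs (hand : List Int) (lastPlay : Option (List Int)) : List (List Int) :=
  let trios :=
    match lastPlay with
    | none => getTriosA hand none                 -- 'if lastPlay' is false
    | some [] => getTriosA hand none              -- an empty lastPlay is falsy
    | some lp => getTriosA hand (some (PySem.List.slice lp (some 0) (some 3)))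
  trios.foldl
    (fun trioSolo v =>
      (getPairsA (removeFromHandA hand [v, v, v]) none).foldl
        (fun acc p => acc ++ [[v, v, v, p, p]]) trioSolo)
    []

-- ===== PORT B =====
def limitOkB : Option Int → Int → Bool
  | none, _ => true
  | some m, v => decide (v > m)

-- _runs: one pass; cnt = 0 plays the role of Python's start state (cur's initial 0 is never read while cnt = 0)
def runsStep (st : List (Int × Int) × Int × Int) (x : Int) : List (Int × Int) × Int × Int :=
  if st.2.2 ≠ 0 ∧ x = st.2.1 then (st.1, st.2.1, st.2.2 + 1)
  else ((if st.2.2 ≠ 0 then st.1 ++ [(st.2.1, st.2.2)] else st.1), x, 1)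

def runsFinish (st : List (Int × Int) × Int × Int) : List (Int × Int) :=
  if st.2.2 ≠ 0 then st.1 ++ [(st.2.1, st.2.2)] else st.1

def runsB (hand : List Int) : List (Int × Int) := runsFinish (hand.foldl runsStep ([], 0, 0))

-- the 'if out and out[-1][0] == val: out[-1] = … else: out.append(…)' block;
-- 'out[-1] = (val, out[-1][1] + cnt)' is dropLast ++ [merged]
def pushRun (out : List (Int × Int)) (val cnt : Int) : List (Int × Int) :=
  match out.getLast? with
  | some last => if last.1 = val then out.dropLast ++ [(val, last.2 + cnt)] else out ++ [(val, cnt)]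
  | none => [(val, cnt)]

-- _drop3: state (out, need)
def drop3Step (v : Int) (st : List (Int × Int) × Int) (r : Int × Int) : List (Int × Int) × Int :=
  let tc : Int × Int :=
    if r.1 = v ∧ st.2 ≠ 0 then
      let take := if r.2 < st.2 then r.2 else st.2
      (st.2 - take, r.2 - take)
    else (st.2, r.2)
  if tc.2 ≠ 0 then (pushRun st.1 r.1 tc.2, tc.1)
  else (st.1, tc.1)

def drop3B (runs : List (Int × Int)) (v : Int) : List (Int × Int) :=
  (runs.foldl (drop3Step v) ([], 3)).1

def getTrioPairs_alt (hand : List Int) (lastPlay : Option (List Int)) : List (List Int) :=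
  let runs := runsB hand
  let limit : Option Int :=
    match lastPlay with
    | some (h :: _) => some h
    | _ => none
  let trios := PySem.List.sorted
    (PySem.Set.ofList ((runs.filter (fun r => 3 ≤ r.2 ∧ limitOkB limit r.1 = true)).map (·.1)))
    (fun x => x) false
  trios.foldl
    (fun result v =>
      result ++
        (PySem.List.sorted
          (PySem.Set.ofList (((drop3B runs v).filter (fun r => 2 ≤ r.2)).map (·.1)))
          (fun x => x) false).map (fun p => [v, v, v, p, p]))
    []

-- ===== PRECONDITION & SPEC =====
def Spec_getTrioPairs (hand : List Int) (lastPlay : Option (List Int)) (out : List (List Int)) : Prop := out = getTrioPairs_alt hand lastPlay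
instance (hand : List Int) (lastPlay : Option (List Int)) (out : List (List Int)) : Decidable (Spec_getTrioPairs hand lastPlay out) := by unfold Spec_getTrioPairs; infer_instance

-- ===== CLAIM (what is proved, stated in full; the proofs are below) =====
def Claim_equal_getTrioPairs : Prop := ∀ (hand : List Int) (lastPlay : Option (List Int)), Dom_getTrioPairs hand lastPlay → Spec_getTrioPairs hand lastPlay (getTrioPairs hand lastPlay)

-- ===== LEMMAS AND PROOFS =====

-- common shape of the A-side scans: fold g over the adjacent pairs / triples of the hand
def pairScan {S : Type} (g : S → Int → Int → S) : S → Int → List Int → S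
  | s, _, [] => s
  | s, prev, y :: u => pairScan g (g s prev y) y u

def tripleScan {S : Type} (g : S → Int → Int → Int → S) : S → Int → Int → List Int → S
  | s, _, _, [] => s
  | s, a, b, c :: u => tripleScan g (g s a b c) b c u

-- range shift: range(a+1, b+1) is range(a, b) moved by one
lemma pyRange_shift (a b : Int) :
    PySem.List.pyRange (a + 1) (b + 1) 1 = (PySem.List.pyRange a b 1).map (· + 1) := by
  rw [PySem.List.pyRange_one, PySem.List.pyRange_one]
  have : b + 1 - (a + 1) = b - a := by ring
  rw [this, List.map_map]
  exact List.map_congr_left (fun k _ => by simp; ring)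

lemma pyGetD_cons_shift (x : Int) (t : List Int) (pos : Int) (h : 1 ≤ pos) :
    PySem.List.pyGetD (x :: t) pos 0 = PySem.List.pyGetD t (pos - 1) 0 := by
  rw [PySem.List.pyGetD_of_nonneg _ _ (by omega : (0:Int) ≤ pos),
      PySem.List.pyGetD_of_nonneg _ _ (by omega : (0:Int) ≤ pos - 1)]
  have : pos.toNat = (pos - 1).toNat + 1 := by omega
  rw [this]
  rfl

lemma pairScan_congr {S : Type} {g g' : S → Int → Int → S}
    (h : ∀ s a b, g s a b = g' s a b) :
    ∀ (t : List Int) (x : Int) (s : S), pairScan g s x t = pairScan g' s x t := by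
  intro t
  induction t with
  | nil => intro x s; rfl
  | cons y u ih => intro x s; simp only [pairScan, h]; exact ih y _

lemma A_pairs_fold {S : Type} (g : S → Int → Int → S) :
    ∀ (t : List Int) (x : Int) (s : S),
    (PySem.List.pyRange 1 ((x :: t).length : Int) 1).foldl
      (fun s pos => g s (PySem.List.pyGetD (x :: t) (pos - 1) 0) (PySem.List.pyGetD (x :: t) pos 0)) s
    = pairScan g s x t := by
  intro t
  induction t with
  | nil =>
    intro x s
    rw [PySem.List.pyRange_one_eq_nil (by simp)]
    rfl
  | cons y u ih =>
    intro x s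
    have hlen : (((x :: y :: u).length : Int)) = (u.length : Int) + 2 := by push_cast [List.length_cons]; ring
    rw [hlen, PySem.List.pyRange_one_cons (by omega)]
    rw [List.foldl_cons]
    rw [(by norm_num : (1:Int) + 1 = 2)]
    have h0 : PySem.List.pyGetD (x :: y :: u) (1 - 1) 0 = x := by norm_num [PySem.List.pyGetD_zero_cons]
    have h1 : PySem.List.pyGetD (x :: y :: u) 1 0 = y := by
      rw [pyGetD_cons_shift _ _ _ le_rfl]; norm_num [PySem.List.pyGetD_zero_cons]
    rw [h0, h1]
    have hsh : PySem.List.pyRange 2 ((u.length : Int) + 2) 1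
        = (PySem.List.pyRange 1 ((u.length : Int) + 1) 1).map (· + 1) := by
      have h := pyRange_shift 1 ((u.length : Int) + 1)
      norm_num at h
      exact h
    rw [hsh, List.foldl_map]
    have hbody : ∀ (acc : S) (pos : Int), pos ∈ PySem.List.pyRange 1 ((u.length : Int) + 1) 1 →
        g acc (PySem.List.pyGetD (x :: y :: u) (pos + 1 - 1) 0) (PySem.List.pyGetD (x :: y :: u) (pos + 1) 0)
        = g acc (PySem.List.pyGetD (y :: u) (pos - 1) 0) (PySem.List.pyGetD (y :: u) pos 0) := by
      intro acc pos hmem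
      rw [PySem.List.mem_pyRange_one] at hmem
      rw [(by ring : pos + 1 - 1 = pos), pyGetD_cons_shift x _ pos (by omega),
          pyGetD_cons_shift x _ (pos + 1) (by omega), (by ring : pos + 1 - 1 = pos)]
    rw [PySem.List.foldl_congr_mem _ _ _ _ hbody]
    have h2 := ih y (g s x y)
    rw [show ((y :: u).length : Int) = (u.length : Int) + 1 by push_cast [List.length_cons]; ring] at h2
    simpa [pairScan] using h2

lemma A_trios_fold {S : Type} (g : S → Int → Int → Int → S) :
    ∀ (t : List Int) (x y : Int) (s : S),
    (PySem.List.pyRange 2 ((x :: y :: t).length : Int) 1).foldl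
      (fun s pos => g s (PySem.List.pyGetD (x :: y :: t) (pos - 2) 0)
        (PySem.List.pyGetD (x :: y :: t) (pos - 1) 0) (PySem.List.pyGetD (x :: y :: t) pos 0)) s
    = tripleScan g s x y t := by
  intro t
  induction t with
  | nil =>
    intro x y s
    rw [PySem.List.pyRange_one_eq_nil (by simp)]
    rfl
  | cons c u ih =>
    intro x y s
    have hlen : (((x :: y :: c :: u).length : Int)) = (u.length : Int) + 3 := by
      push_cast [List.length_cons]; ring
    rw [hlen, PySem.List.pyRange_one_cons (by omega)]
    rw [List.foldl_cons]
    have h0 : PySem.List.pyGetD (x :: y :: c :: u) (2 - 2) 0 = x := by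
      norm_num [PySem.List.pyGetD_zero_cons]
    have h1 : PySem.List.pyGetD (x :: y :: c :: u) (2 - 1) 0 = y := by
      rw [(by norm_num : (2:Int) - 1 = 1), pyGetD_cons_shift _ _ _ le_rfl]
      norm_num [PySem.List.pyGetD_zero_cons]
    have h2 : PySem.List.pyGetD (x :: y :: c :: u) 2 0 = c := by
      rw [pyGetD_cons_shift _ _ _ (by norm_num), (by norm_num : (2:Int) - 1 = 1),
          pyGetD_cons_shift _ _ _ le_rfl]
      norm_num [PySem.List.pyGetD_zero_cons]
    rw [h0, h1, h2, (by norm_num : (2:Int) + 1 = 3)]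
    have hsh : PySem.List.pyRange 3 ((u.length : Int) + 3) 1
        = (PySem.List.pyRange 2 ((u.length : Int) + 2) 1).map (· + 1) := by
      have h := pyRange_shift 2 ((u.length : Int) + 2)
      norm_num at h
      exact h
    rw [hsh, List.foldl_map]
    have hbody : ∀ (acc : S), ∀ pos ∈ PySem.List.pyRange 2 ((u.length : Int) + 2) 1,
        g acc (PySem.List.pyGetD (x :: y :: c :: u) (pos + 1 - 2) 0)
          (PySem.List.pyGetD (x :: y :: c :: u) (pos + 1 - 1) 0)
          (PySem.List.pyGetD (x :: y :: c :: u) (pos + 1) 0)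
        = g acc (PySem.List.pyGetD (y :: c :: u) (pos - 2) 0)
            (PySem.List.pyGetD (y :: c :: u) (pos - 1) 0)
            (PySem.List.pyGetD (y :: c :: u) pos 0) := by
      intro acc pos hmem
      rw [PySem.List.mem_pyRange_one] at hmem
      rw [(by ring : pos + 1 - 2 = (pos - 1)), (by ring : pos + 1 - 1 = pos),
          pyGetD_cons_shift x _ (pos - 1) (by omega),
          pyGetD_cons_shift x _ pos (by omega),
          pyGetD_cons_shift x _ (pos + 1) (by omega),
          (by ring : pos - 1 - 1 = pos - 2), (by ring : pos + 1 - 1 = pos)]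
    rw [PySem.List.foldl_congr_mem _ _ _ _ hbody]
    have h3 := ih y c (g s x y c)
    rw [show ((y :: c :: u).length : Int) = (u.length : Int) + 2 by
      push_cast [List.length_cons]; ring] at h3
    simpa [tripleScan] using h3

-- 'the hand has two adjacent copies of w' / 'three adjacent copies of w'
def hasPair (w : Int) : List Int → Prop
  | a :: b :: t => (a = b ∧ b = w) ∨ hasPair w (b :: t)
  | _ => False

def hasTrio (w : Int) : List Int → Prop
  | a :: b :: c :: t => (c = b ∧ c = a ∧ c = w) ∨ hasTrio w (b :: c :: t)
  | _ => False

lemma mem_pairScan (w : Int) :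
    ∀ (t : List Int) (x : Int) (s : PySem.Set Int),
    (w ∈ pairScan (fun s a b => if a = b then PySem.Set.add s b else s) s x t)
    ↔ w ∈ s ∨ hasPair w (x :: t) := by
  intro t
  induction t with
  | nil => intro x s; simp [pairScan, hasPair]
  | cons y u ih =>
    intro x s
    rw [show pairScan (fun s a b => if a = b then PySem.Set.add s b else s) s x (y :: u)
        = pairScan (fun s a b => if a = b then PySem.Set.add s b else s)
            (if x = y then PySem.Set.add s y else s) y u from rfl, ih]
    have : (w ∈ if x = y then PySem.Set.add s y else s) ↔ w ∈ s ∨ (x = y ∧ y = w) := by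
      split_ifs with hxy
      · rw [PySem.Set.mem_add]; tauto
      · tauto
    rw [this]
    show _ ↔ _ ∨ (x = y ∧ y = w) ∨ hasPair w (y :: u)
    tauto

lemma nodup_pairScan :
    ∀ (t : List Int) (x : Int) (s : PySem.Set Int), s.Nodup →
    (pairScan (fun s a b => if a = b then PySem.Set.add s b else s) s x t).Nodup := by
  intro t
  induction t with
  | nil => intro x s hs; exact hs
  | cons y u ih =>
    intro x s hs
    refine ih y _ ?_
    show List.Nodup (if x = y then PySem.Set.add s y else s)
    split_ifs <;> [exact PySem.Set.nodup_add _ _ hs; exact hs]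

lemma mem_tripleScan (cond : Int → Bool) (w : Int) :
    ∀ (t : List Int) (x y : Int) (s : PySem.Set Int),
    (w ∈ tripleScan (fun s a b c => if c = b ∧ c = a ∧ cond c = true then PySem.Set.add s c else s) s x y t)
    ↔ w ∈ s ∨ (hasTrio w (x :: y :: t) ∧ cond w = true) := by
  intro t
  induction t with
  | nil => intro x y s; simp [tripleScan, hasTrio]
  | cons c u ih =>
    intro x y s
    rw [show tripleScan (fun s a b c => if c = b ∧ c = a ∧ cond c = true then PySem.Set.add s c else s) s x y (c :: u)
        = tripleScan (fun s a b c => if c = b ∧ c = a ∧ cond c = true then PySem.Set.add s c else s)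
            (if c = y ∧ c = x ∧ cond c = true then PySem.Set.add s c else s) y c u from rfl, ih]
    have hm : (w ∈ if c = y ∧ c = x ∧ cond c = true then PySem.Set.add s c else s)
        ↔ w ∈ s ∨ ((c = y ∧ c = x ∧ c = w) ∧ cond w = true) := by
      split_ifs with hc
      · rw [PySem.Set.mem_add]
        constructor
        · rintro (h | rfl)
          · exact Or.inl h
          · exact Or.inr ⟨⟨hc.1, hc.2.1, rfl⟩, hc.2.2⟩
        · rintro (h | ⟨⟨_, _, rfl⟩, hw⟩)
          · exact Or.inl h
          · exact Or.inr rfl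
      · constructor
        · exact Or.inl
        · rintro (h | ⟨⟨h1, h2, rfl⟩, hw⟩)
          · exact h
          · exact absurd ⟨h1, h2, hw⟩ hc
    rw [hm]
    show _ ↔ _ ∨ ((c = y ∧ c = x ∧ c = w) ∨ hasTrio w (y :: c :: u)) ∧ _
    tauto

lemma nodup_tripleScan (cond : Int → Bool) :
    ∀ (t : List Int) (x y : Int) (s : PySem.Set Int), s.Nodup →
    (tripleScan (fun s a b c => if c = b ∧ c = a ∧ cond c = true then PySem.Set.add s c else s) s x y t).Nodup := by
  intro t
  induction t with
  | nil => intro x y s hs; exact hs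
  | cons c u ih =>
    intro x y s hs
    refine ih y c _ ?_
    show List.Nodup (if c = y ∧ c = x ∧ cond c = true then PySem.Set.add s c else s)
    split_ifs <;> [exact PySem.Set.nodup_add _ _ hs; exact hs]

-- skip-k removal of v (what three successive list.remove(v) perform, k = 3)
def without3Go (v : Int) : Nat → List Int → List Int
  | _, [] => []
  | skip, x :: xs =>
    if skip ≠ 0 ∧ x = v then without3Go v (skip - 1) xs else x :: without3Go v skip xs

lemma without3Go_zero (v : Int) : ∀ l : List Int, without3Go v 0 l = l := by
  intro l
  induction l with
  | nil => rfl
  | cons x t ih => simp [without3Go, ih]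

lemma without3Go_one (v : Int) :
    ∀ l : List Int, without3Go v 1 l = (PySem.List.remove? l v).getD l := by
  intro l
  induction l with
  | nil => rfl
  | cons x t ih =>
    by_cases hx : x = v
    · subst hx
      simp [without3Go, without3Go_zero]
    · rw [PySem.List.remove?_cons_of_ne t hx]
      cases hr : PySem.List.remove? t v <;> simp [without3Go, hx, ih, hr]

lemma without3Go_succ (v : Int) (k : Nat) :
    ∀ l : List Int, without3Go v (k + 1) l = without3Go v k (without3Go v 1 l) := by
  intro l
  induction l with
  | nil => rfl
  | cons x t ih =>
    by_cases hx : x = v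
    · subst hx
      simp [without3Go, without3Go_zero]
    · simp [without3Go, hx, ih]

lemma removeFromHandA_eq (hand : List Int) (v : Int) :
    removeFromHandA hand [v, v, v] = without3Go v 3 hand := by
  show removeFromHandA hand [v, v, v] = without3Go v 3 hand
  rw [(by norm_num : (3 : Nat) = 1 + 1 + 1), without3Go_succ, without3Go_succ,
      without3Go_one, without3Go_one, without3Go_one]
  rfl

-- ================== run-length encoding, proof side ==================
def decodeR (R : List (Int × Int)) : List Int :=
  R.flatMap (fun p => List.replicate p.2.toNat p.1)

def properR (R : List (Int × Int)) : Prop :=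
  R.IsChain (fun a b => a.1 ≠ b.1) ∧ ∀ p ∈ R, 1 ≤ p.2

-- a maximal block of v followed by a list not starting with v
lemma hasPair_replicate (v w : Int) (l : List Int)
    (hl : ∀ h, l.head? = some h → h ≠ v) :
    ∀ m : Nat, 1 ≤ m →
    (hasPair w (List.replicate m v ++ l) ↔ (w = v ∧ 2 ≤ m) ∨ hasPair w l) := by
  intro m
  induction m with
  | zero => omega
  | succ n ih =>
    intro _
    match n with
    | 0 =>
      cases l with
      | nil => simp [hasPair]
      | cons h l' =>
        have hne : h ≠ v := hl h rfl
        simp [hasPair]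
        omega
    | k + 1 =>
      rw [show List.replicate (k + 1 + 1) v ++ l = v :: (List.replicate (k + 1) v ++ l) from rfl]
      rw [show List.replicate (k + 1) v ++ l = v :: (List.replicate k v ++ l) from rfl]
      rw [show hasPair w (v :: v :: (List.replicate k v ++ l))
          ↔ (v = v ∧ v = w) ∨ hasPair w (v :: (List.replicate k v ++ l)) from Iff.rfl]
      rw [show (v :: (List.replicate k v ++ l)) = List.replicate (k + 1) v ++ l from rfl]
      rw [ih (by omega)]
      constructor
      · rintro (⟨_, rfl⟩ | ⟨⟨rfl, _⟩, _⟩ | h)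
        · exact Or.inl ⟨rfl, by omega⟩
        · exact Or.inl ⟨rfl, by omega⟩
        · exact Or.inr h
      · rintro (⟨rfl, _⟩ | h)
        · exact Or.inl ⟨rfl, rfl⟩
        · exact Or.inr (Or.inr h)

lemma hasTrio_replicate (v w : Int) (l : List Int)
    (hl : ∀ h, l.head? = some h → h ≠ v) :
    ∀ m : Nat, 1 ≤ m →
    (hasTrio w (List.replicate m v ++ l) ↔ (w = v ∧ 3 ≤ m) ∨ hasTrio w l) := by
  intro m
  induction m with
  | zero => omega
  | succ n ih =>
    intro _
    match n with
    | 0 =>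
      cases l with
      | nil => simp [hasTrio]
      | cons h l' =>
        have hne : h ≠ v := hl h rfl
        cases l' with
        | nil => simp [hasTrio]
        | cons h2 l'' =>
          rw [show List.replicate 1 v ++ h :: h2 :: l'' = v :: h :: h2 :: l'' from rfl]
          rw [show hasTrio w (v :: h :: h2 :: l'')
              ↔ (h2 = h ∧ h2 = v ∧ h2 = w) ∨ hasTrio w (h :: h2 :: l'') from Iff.rfl]
          constructor
          · rintro (⟨rfl, rfl, _⟩ | h)
            · exact absurd rfl hne
            · exact Or.inr h
          · rintro (⟨_, h3⟩ | h)
            · omega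
            · exact Or.inr h
    | 1 =>
      rw [show List.replicate 2 v ++ l = v :: v :: l from rfl]
      cases l with
      | nil => simp [hasTrio]
      | cons h l' =>
        have hne : h ≠ v := hl h rfl
        rw [show hasTrio w (v :: v :: h :: l')
            ↔ (h = v ∧ h = v ∧ h = w) ∨ hasTrio w (v :: h :: l') from Iff.rfl]
        rw [show (v :: h :: l') = List.replicate 1 v ++ (h :: l') from rfl]
        rw [ih (by omega)]
        constructor
        · rintro (⟨hv, _⟩ | ⟨⟨_, h3⟩, _⟩ | h)
          · exact absurd hv hne
          · omega
          · exact Or.inr h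
        · rintro (⟨_, h3⟩ | h)
          · omega
          · exact Or.inr (Or.inr h)
    | k + 2 =>
      rw [show List.replicate (k + 2 + 1) v ++ l = v :: v :: v :: (List.replicate k v ++ l) from rfl]
      rw [show hasTrio w (v :: v :: v :: (List.replicate k v ++ l))
          ↔ (v = v ∧ v = v ∧ v = w) ∨ hasTrio w (v :: v :: (List.replicate k v ++ l)) from Iff.rfl]
      rw [show (v :: v :: (List.replicate k v ++ l)) = List.replicate (k + 2) v ++ l from rfl]
      rw [ih (by omega)]
      constructor
      · rintro (⟨_, _, rfl⟩ | ⟨⟨rfl, _⟩, _⟩ | h)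
        · exact Or.inl ⟨rfl, by omega⟩
        · exact Or.inl ⟨rfl, by omega⟩
        · exact Or.inr h
      · rintro (⟨rfl, _⟩ | h)
        · exact Or.inl ⟨rfl, rfl, rfl⟩
        · exact Or.inr (Or.inr h)

lemma properR_tail (p : Int × Int) (R : List (Int × Int)) (h : properR (p :: R)) : properR R :=
  ⟨h.1.tail, fun q hq => h.2 q (List.mem_cons_of_mem p hq)⟩

lemma head?_decodeR (p : Int × Int) (R : List (Int × Int)) (h : properR (p :: R)) :
    (decodeR (p :: R)).head? = some p.1 := by
  have h1 : 1 ≤ p.2 := h.2 p List.mem_cons_self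
  have : p.2.toNat = (p.2.toNat - 1) + 1 := by omega
  show (List.replicate p.2.toNat p.1 ++ decodeR R).head? = some p.1
  rw [this, List.replicate_succ]
  rfl

lemma headNe_decodeR (u : Int) (R : List (Int × Int)) (h : properR R)
    (hne : ∀ p, R.head? = some p → p.1 ≠ u) :
    ∀ x, (decodeR R).head? = some x → x ≠ u := by
  cases R with
  | nil => intro x hx; exact absurd hx (by simp [decodeR])
  | cons p R' =>
    intro x hx
    rw [head?_decodeR p R' h] at hx
    cases hx
    exact hne p rfl

lemma hasPair_decodeR (w : Int) :
    ∀ R : List (Int × Int), properR R →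
    (hasPair w (decodeR R) ↔ ∃ p ∈ R, p.1 = w ∧ 2 ≤ p.2) := by
  intro R
  induction R with
  | nil => intro _; simp [decodeR, hasPair]
  | cons p R' ih =>
    intro h
    have h1 : 1 ≤ p.2 := h.2 p List.mem_cons_self
    have hhd : ∀ q, R'.head? = some q → q.1 ≠ p.1 := by
      intro q hq
      have := (List.isChain_cons.mp h.1).1 q (by rw [hq]; rfl)
      exact fun e => this e.symm
    have hl := headNe_decodeR p.1 R' (properR_tail p R' h) hhd
    show hasPair w (List.replicate p.2.toNat p.1 ++ decodeR R') ↔ _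
    rw [hasPair_replicate p.1 w (decodeR R') hl p.2.toNat (by omega),
        ih (properR_tail p R' h)]
    constructor
    · rintro (⟨rfl, hm⟩ | ⟨q, hq, rfl, hq2⟩)
      · exact ⟨p, List.mem_cons_self, rfl, by omega⟩
      · exact ⟨q, List.mem_cons_of_mem p hq, rfl, hq2⟩
    · rintro ⟨q, hq, rfl, hq2⟩
      rcases List.mem_cons.mp hq with rfl | hq'
      · exact Or.inl ⟨rfl, by omega⟩
      · exact Or.inr ⟨q, hq', rfl, hq2⟩

lemma hasTrio_decodeR (w : Int) :
    ∀ R : List (Int × Int), properR R →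
    (hasTrio w (decodeR R) ↔ ∃ p ∈ R, p.1 = w ∧ 3 ≤ p.2) := by
  intro R
  induction R with
  | nil => intro _; simp [decodeR, hasTrio]
  | cons p R' ih =>
    intro h
    have h1 : 1 ≤ p.2 := h.2 p List.mem_cons_self
    have hhd : ∀ q, R'.head? = some q → q.1 ≠ p.1 := by
      intro q hq
      have := (List.isChain_cons.mp h.1).1 q (by rw [hq]; rfl)
      exact fun e => this e.symm
    have hl := headNe_decodeR p.1 R' (properR_tail p R' h) hhd
    show hasTrio w (List.replicate p.2.toNat p.1 ++ decodeR R') ↔ _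
    rw [hasTrio_replicate p.1 w (decodeR R') hl p.2.toNat (by omega),
        ih (properR_tail p R' h)]
    constructor
    · rintro (⟨rfl, hm⟩ | ⟨q, hq, rfl, hq2⟩)
      · exact ⟨p, List.mem_cons_self, rfl, by omega⟩
      · exact ⟨q, List.mem_cons_of_mem p hq, rfl, hq2⟩
    · rintro ⟨q, hq, rfl, hq2⟩
      rcases List.mem_cons.mp hq with rfl | hq'
      · exact Or.inl ⟨rfl, by omega⟩
      · exact Or.inr ⟨q, hq', rfl, hq2⟩

-- ================== correctness of runsB ==================
lemma decodeR_append (R S : List (Int × Int)) :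
    decodeR (R ++ S) = decodeR R ++ decodeR S := by
  simp [decodeR]

lemma properR_snoc (R : List (Int × Int)) (x c : Int) (h : properR R) (hc : 1 ≤ c)
    (hlast : ∀ p, R.getLast? = some p → p.1 ≠ x) : properR (R ++ [(x, c)]) := by
  constructor
  · rw [List.isChain_append]
    refine ⟨h.1, by simp, ?_⟩
    intro p hp q hq
    cases hq
    exact hlast p hp
  · intro p hp
    rcases List.mem_append.mp hp with hp | hp
    · exact h.2 p hp
    · cases List.mem_singleton.mp hp; exact hc

lemma properR_bump (R : List (Int × Int)) (x c c' : Int) (hc : 1 ≤ c')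
    (h : properR (R ++ [(x, c)])) : properR (R ++ [(x, c')]) := by
  obtain ⟨hch, hcnt⟩ := h
  rw [List.isChain_append] at hch
  constructor
  · rw [List.isChain_append]
    refine ⟨hch.1, by simp, ?_⟩
    intro p hp q hq
    cases hq
    exact hch.2.2 p hp (x, c) rfl
  · intro p hp
    rcases List.mem_append.mp hp with hp | hp
    · exact hcnt p (List.mem_append.mpr (Or.inl hp))
    · cases List.mem_singleton.mp hp; exact hc

lemma runs_fold_spec :
    ∀ (l : List Int) (runs : List (Int × Int)) (cur cnt : Int),
    1 ≤ cnt → properR (runs ++ [(cur, cnt)]) →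
    decodeR (runsFinish (l.foldl runsStep (runs, cur, cnt))) = decodeR (runs ++ [(cur, cnt)]) ++ l
    ∧ properR (runsFinish (l.foldl runsStep (runs, cur, cnt))) := by
  intro l
  induction l with
  | nil =>
    intro runs cur cnt h1 h2
    have : runsFinish (runs, cur, cnt) = runs ++ [(cur, cnt)] := by
      simp [runsFinish]
      omega
    simp [this, h2]
  | cons x t ih =>
    intro runs cur cnt h1 h2
    rw [List.foldl_cons]
    by_cases hx : x = cur
    · have hstep : runsStep (runs, cur, cnt) x = (runs, cur, cnt + 1) := by
        simp [runsStep, hx]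
      rw [hstep]
      obtain ⟨hd, hp⟩ := ih runs cur (cnt + 1) (by omega) (properR_bump runs cur cnt (cnt + 1) (by omega) h2)
      refine ⟨?_, hp⟩
      rw [hd, decodeR_append, decodeR_append]
      have : List.replicate (cnt + 1).toNat cur = List.replicate cnt.toNat cur ++ [cur] := by
        rw [show (cnt + 1).toNat = cnt.toNat + 1 by omega, List.replicate_succ']
      simp [decodeR, this, hx]
    · have hstep : runsStep (runs, cur, cnt) x = (runs ++ [(cur, cnt)], x, 1) := by
        simp [runsStep, hx]
        omega
      rw [hstep]
      have hproper : properR ((runs ++ [(cur, cnt)]) ++ [(x, 1)]) := by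
        refine properR_snoc _ _ _ h2 le_rfl ?_
        intro p hp
        rw [List.getLast?_append_of_ne_nil _ (by simp)] at hp
        cases hp
        exact fun e => hx e.symm
      obtain ⟨hd, hp⟩ := ih (runs ++ [(cur, cnt)]) x 1 le_rfl hproper
      refine ⟨?_, hp⟩
      rw [hd]
      simp [decodeR]

lemma decodeR_runsB (hand : List Int) : decodeR (runsB hand) = hand := by
  cases hand with
  | nil => rfl
  | cons x t =>
    show decodeR (runsFinish ((x :: t).foldl runsStep ([], 0, 0))) = x :: t
    rw [List.foldl_cons]
    have hstep : runsStep ([], 0, 0) x = ([], x, 1) := by simp [runsStep]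
    rw [hstep]
    obtain ⟨hd, _⟩ := runs_fold_spec t [] x 1 le_rfl (by constructor <;> simp)
    rw [hd]
    simp [decodeR]

lemma properR_runsB (hand : List Int) : properR (runsB hand) := by
  cases hand with
  | nil =>
    have : runsB [] = [] := rfl
    rw [this]
    exact ⟨by simp, by simp⟩
  | cons x t =>
    show properR (runsFinish ((x :: t).foldl runsStep ([], 0, 0)))
    rw [List.foldl_cons]
    have hstep : runsStep ([], 0, 0) x = ([], x, 1) := by simp [runsStep]
    rw [hstep]
    exact (runs_fold_spec t [] x 1 le_rfl (by constructor <;> simp)).2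

-- ================== correctness of drop3B ==================
lemma wGo_replicate_eq (v : Int) :
    ∀ (m k : Nat) (rest : List Int),
    without3Go v k (List.replicate m v ++ rest)
    = List.replicate (m - k) v ++ without3Go v (k - m) rest := by
  intro m
  induction m with
  | zero => intro k rest; simp
  | succ n ih =>
    intro k rest
    rw [List.replicate_succ, List.cons_append]
    by_cases hk : k = 0
    · subst hk
      simp [without3Go, without3Go_zero, List.replicate_succ]
    · rw [show without3Go v k (v :: (List.replicate n v ++ rest))
          = without3Go v (k - 1) (List.replicate n v ++ rest) by
        simp [without3Go, hk]]
      rw [ih (k - 1) rest]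
      congr 1
      · congr 1
        omega
      · congr 1
        omega

lemma wGo_replicate_ne (v u : Int) (hne : u ≠ v) :
    ∀ (m : Nat) (k : Nat) (rest : List Int),
    without3Go v k (List.replicate m u ++ rest)
    = List.replicate m u ++ without3Go v k rest := by
  intro m
  induction m with
  | zero => intro k rest; simp
  | succ n ih =>
    intro k rest
    rw [List.replicate_succ, List.cons_append]
    rw [show without3Go v k (u :: (List.replicate n u ++ rest))
        = u :: without3Go v k (List.replicate n u ++ rest) by
      simp [without3Go, hne]]
    rw [ih k rest]
    simp

lemma decodeR_pushRun (out : List (Int × Int)) (val cnt : Int)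
    (h : ∀ p ∈ out, 1 ≤ p.2) (hc : 0 ≤ cnt) :
    decodeR (pushRun out val cnt) = decodeR out ++ List.replicate cnt.toNat val := by
  unfold pushRun
  cases hlast : out.getLast? with
  | none =>
    have : out = [] := List.getLast?_eq_none_iff.mp hlast
    subst this
    show decodeR [(val, cnt)] = decodeR ([] : List (Int × Int)) ++ List.replicate cnt.toNat val
    simp [decodeR]
  | some last =>
    obtain ⟨ys, rfl⟩ := List.getLast?_eq_some_iff.mp hlast
    have h1 : 1 ≤ last.2 := h last (by simp)
    show decodeR (if last.1 = val then (ys ++ [last]).dropLast ++ [(val, last.2 + cnt)]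
        else (ys ++ [last]) ++ [(val, cnt)]) = _
    by_cases he : last.1 = val
    · rw [if_pos he, List.dropLast_concat, decodeR_append, decodeR_append]
      have ht : (last.2 + cnt).toNat = last.2.toNat + cnt.toNat := by omega
      have hsplit : decodeR [(val, last.2 + cnt)]
          = List.replicate last.2.toNat last.1 ++ List.replicate cnt.toNat val := by
        rw [show decodeR [(val, last.2 + cnt)] = List.replicate (last.2 + cnt).toNat val from by
          simp [decodeR], ht, List.replicate_add, ← he]
      rw [hsplit, show decodeR [last] = List.replicate last.2.toNat last.1 from by simp [decodeR]]
      simp [List.append_assoc]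
    · rw [if_neg he, decodeR_append, decodeR_append]
      simp [decodeR]

lemma properR_pushRun (out : List (Int × Int)) (val cnt : Int)
    (h : properR out) (hc : 1 ≤ cnt) : properR (pushRun out val cnt) := by
  unfold pushRun
  cases hlast : out.getLast? with
  | none =>
    show properR [(val, cnt)]
    exact ⟨by simp, by simp; omega⟩
  | some last =>
    obtain ⟨ys, rfl⟩ := List.getLast?_eq_some_iff.mp hlast
    show properR (if last.1 = val then (ys ++ [last]).dropLast ++ [(val, last.2 + cnt)]
        else (ys ++ [last]) ++ [(val, cnt)])
    by_cases he : last.1 = val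
    · rw [if_pos he, List.dropLast_concat]
      obtain ⟨hch, hcnt⟩ := h
      rw [List.isChain_append] at hch
      constructor
      · rw [List.isChain_append]
        refine ⟨hch.1, by simp, ?_⟩
        intro p hp q hq
        cases hq
        exact he ▸ hch.2.2 p hp last rfl
      · intro p hp
        rcases List.mem_append.mp hp with hp | hp
        · exact hcnt p (List.mem_append.mpr (Or.inl hp))
        · cases List.mem_singleton.mp hp
          have := hcnt last (by simp)
          omega
    · rw [if_neg he]
      refine properR_snoc _ _ _ h hc ?_
      intro p hp
      rw [hlast] at hp
      cases hp
      exact he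

lemma drop3_fold_spec (v : Int) :
    ∀ (R : List (Int × Int)) (out : List (Int × Int)) (need : Int),
    properR R → properR out → 0 ≤ need →
    decodeR ((R.foldl (drop3Step v) (out, need)).1)
      = decodeR out ++ without3Go v need.toNat (decodeR R)
    ∧ properR ((R.foldl (drop3Step v) (out, need)).1) := by
  intro R
  induction R with
  | nil =>
    intro out need _ hout _
    refine ⟨?_, hout⟩
    rw [show decodeR ([] : List (Int × Int)) = [] from rfl,
        show without3Go v need.toNat ([] : List Int) = [] from rfl]
    simp
  | cons r R' ih =>
    intro out need hR hout hneed
    have hr1 : 1 ≤ r.2 := hR.2 r List.mem_cons_self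
    have hR' : properR R' := properR_tail r R' hR
    have hdec : decodeR (r :: R') = List.replicate r.2.toNat r.1 ++ decodeR R' := by
      simp [decodeR]
    rw [List.foldl_cons]
    by_cases hv : r.1 = v ∧ need ≠ 0
    · by_cases hlt : r.2 < need
      · -- run swallowed entirely: take = r.2, cnt' = 0
        have hstep : drop3Step v (out, need) r = (out, need - r.2) := by
          simp [drop3Step, hv, hlt]
        rw [hstep]
        obtain ⟨hd, hp⟩ := ih out (need - r.2) hR' hout (by omega)
        refine ⟨?_, hp⟩
        rw [hd, hdec, hv.1, wGo_replicate_eq]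
        rw [show r.2.toNat - need.toNat = 0 by omega,
            show need.toNat - r.2.toNat = (need - r.2).toNat by omega]
        simp
      · -- take = need; cnt' = r.2 - need
        by_cases hz : r.2 - need = 0
        · have hstep : drop3Step v (out, need) r = (out, 0) := by
            simp [drop3Step, hv, hlt, hz]
          rw [hstep]
          obtain ⟨hd, hp⟩ := ih out 0 hR' hout le_rfl
          refine ⟨?_, hp⟩
          rw [hd, hdec, hv.1, wGo_replicate_eq]
          rw [show r.2.toNat - need.toNat = 0 by omega,
              show need.toNat - r.2.toNat = (0:Int).toNat by omega]
          simp
        · have hstep : drop3Step v (out, need) r = (pushRun out r.1 (r.2 - need), 0) := by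
            simp [drop3Step, hv, hlt, hz]
          rw [hstep]
          obtain ⟨hd, hp⟩ := ih (pushRun out r.1 (r.2 - need)) 0
            hR' (properR_pushRun out r.1 (r.2 - need) hout (by omega)) le_rfl
          refine ⟨?_, hp⟩
          rw [hd, decodeR_pushRun out r.1 (r.2 - need) hout.2 (by omega), hdec, hv.1,
              wGo_replicate_eq]
          rw [show r.2.toNat - need.toNat = (r.2 - need).toNat by omega,
              show need.toNat - r.2.toNat = (0:Int).toNat by omega]
          simp [without3Go_zero, List.append_assoc]
    · -- run kept whole
      have hstep : drop3Step v (out, need) r = (pushRun out r.1 r.2, need) := by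
        simp only [drop3Step, if_neg hv]
        simp
        omega
      rw [hstep]
      obtain ⟨hd, hp⟩ := ih (pushRun out r.1 r.2) need
        hR' (properR_pushRun out r.1 r.2 hout (by omega)) hneed
      refine ⟨?_, hp⟩
      rw [hd, hdec, decodeR_pushRun out r.1 r.2 hout.2 (by omega)]
      by_cases hrv : r.1 = v
      · have hn0 : need = 0 := by
          by_contra hne
          exact hv ⟨hrv, hne⟩
        subst hn0
        rw [hrv, wGo_replicate_eq]
        simp [without3Go_zero, List.append_assoc]
      · rw [wGo_replicate_ne v r.1 hrv]
        simp [List.append_assoc]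

lemma decodeR_drop3B (hand : List Int) (v : Int) :
    decodeR (drop3B (runsB hand) v) = without3Go v 3 hand := by
  obtain ⟨hd, _⟩ := drop3_fold_spec v (runsB hand) [] 3 (properR_runsB hand) ⟨by simp, by simp⟩ (by norm_num)
  rw [drop3B, hd, decodeR_runsB]
  simp [decodeR]

lemma properR_drop3B (hand : List Int) (v : Int) :
    properR (drop3B (runsB hand) v) :=
  (drop3_fold_spec v (runsB hand) [] 3 (properR_runsB hand) ⟨by simp, by simp⟩ (by norm_num)).2

-- ================== assembling the two programs ==================
def pairsFoldA (L : List Int) : PySem.Set Int :=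
  (PySem.List.pyRange 1 (PySem.List.len L) 1).foldl
    (fun s pos =>
      if PySem.List.pyGetD L pos 0 = PySem.List.pyGetD L (pos - 1) 0 ∧
         pairCondA none (PySem.List.pyGetD L pos 0) = true
      then PySem.Set.add s (PySem.List.pyGetD L pos 0) else s)
    PySem.Set.empty

def triosFoldA (L : List Int) (lp : Option (List Int)) : PySem.Set Int :=
  (PySem.List.pyRange 2 (PySem.List.len L) 1).foldl
    (fun s pos =>
      if PySem.List.pyGetD L pos 0 = PySem.List.pyGetD L (pos - 1) 0 ∧
         PySem.List.pyGetD L pos 0 = PySem.List.pyGetD L (pos - 2) 0 ∧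
         pairCondA lp (PySem.List.pyGetD L pos 0) = true
      then PySem.Set.add s (PySem.List.pyGetD L pos 0) else s)
    PySem.Set.empty

lemma getPairsA_none (L : List Int) :
    getPairsA L none = PySem.List.sorted (pairsFoldA L) (fun x => x) false := rfl

lemma getTriosA_def (L : List Int) (lp : Option (List Int)) :
    getTriosA L lp = PySem.List.sorted (triosFoldA L lp) (fun x => x) false := rfl

lemma pairsFoldA_scan (L : List Int) (x : Int) (t : List Int) (h : L = x :: t) :
    pairsFoldA L = pairScan (fun s a b => if a = b then PySem.Set.add s b else s)
      PySem.Set.empty x t := by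
  subst h
  unfold pairsFoldA
  rw [PySem.List.len_eq,
    A_pairs_fold (fun s a b => if b = a ∧ pairCondA none b = true then PySem.Set.add s b else s) t x PySem.Set.empty]
  apply pairScan_congr
  intro s a b
  by_cases hab : a = b
  · simp [hab, pairCondA]
  · rw [if_neg (by rintro ⟨e, _⟩; exact hab e.symm), if_neg hab]

lemma mem_pairsFoldA (L : List Int) (w : Int) : w ∈ pairsFoldA L ↔ hasPair w L := by
  cases L with
  | nil =>
    rw [show pairsFoldA [] = PySem.Set.empty from by
      unfold pairsFoldA
      rw [show PySem.List.len ([] : List Int) = 0 from rfl,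
          PySem.List.pyRange_one_eq_nil (by norm_num)]
      rfl]
    simp [PySem.Set.empty, hasPair]
  | cons x t =>
    rw [pairsFoldA_scan _ x t rfl, mem_pairScan]
    simp [PySem.Set.empty]

lemma nodup_pairsFoldA (L : List Int) : (pairsFoldA L).Nodup := by
  cases L with
  | nil =>
    rw [show pairsFoldA [] = PySem.Set.empty from by
      unfold pairsFoldA
      rw [show PySem.List.len ([] : List Int) = 0 from rfl,
          PySem.List.pyRange_one_eq_nil (by norm_num)]
      rfl]
    simp [PySem.Set.empty]
  | cons x t =>
    rw [pairsFoldA_scan _ x t rfl]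
    exact nodup_pairScan t x _ (by simp [PySem.Set.empty])

lemma triosFoldA_scan (L : List Int) (lp : Option (List Int)) (x y : Int) (t : List Int)
    (h : L = x :: y :: t) :
    triosFoldA L lp = tripleScan
      (fun s a b c => if c = b ∧ c = a ∧ pairCondA lp c = true then PySem.Set.add s c else s)
      PySem.Set.empty x y t := by
  subst h
  unfold triosFoldA
  rw [PySem.List.len_eq,
    A_trios_fold (fun s a b c => if c = b ∧ c = a ∧ pairCondA lp c = true then PySem.Set.add s c else s) t x y PySem.Set.empty]

lemma triosFoldA_short (L : List Int) (lp : Option (List Int)) (h : L.length ≤ 2) :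
    triosFoldA L lp = PySem.Set.empty := by
  unfold triosFoldA
  rw [PySem.List.len_eq, PySem.List.pyRange_one_eq_nil (by exact_mod_cast h)]
  rfl

lemma mem_triosFoldA (L : List Int) (lp : Option (List Int)) (w : Int) :
    w ∈ triosFoldA L lp ↔ hasTrio w L ∧ pairCondA lp w = true := by
  match L with
  | [] =>
    rw [triosFoldA_short _ _ (by simp)]
    simp [PySem.Set.empty, hasTrio]
  | [x] =>
    rw [triosFoldA_short _ _ (by simp)]
    simp [PySem.Set.empty, hasTrio]
  | x :: y :: t =>
    rw [triosFoldA_scan _ lp x y t rfl, mem_tripleScan]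
    simp [PySem.Set.empty]

lemma nodup_triosFoldA (L : List Int) (lp : Option (List Int)) : (triosFoldA L lp).Nodup := by
  match L with
  | [] => rw [triosFoldA_short _ _ (by simp)]; simp [PySem.Set.empty]
  | [x] => rw [triosFoldA_short _ _ (by simp)]; simp [PySem.Set.empty]
  | x :: y :: t =>
    rw [triosFoldA_scan _ lp x y t rfl]
    exact nodup_tripleScan _ t x y _ (by simp [PySem.Set.empty])

lemma sortedSet_eq (s t : List Int) (hs : s.Nodup) (ht : t.Nodup)
    (h : ∀ w, w ∈ s ↔ w ∈ t) :
    PySem.List.sorted s (fun x => x) false = PySem.List.sorted t (fun x => x) false :=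
  (PySem.List.sorted_id_eq_sorted_id_iff_perm s t).mpr ((List.perm_ext_iff_of_nodup hs ht).mpr h)

lemma trios_eq (hand : List Int) (lp : Option (List Int)) (limit : Option Int)
    (h : ∀ w, pairCondA lp w = limitOkB limit w) :
    getTriosA hand lp
      = PySem.List.sorted
          (PySem.Set.ofList (((runsB hand).filter
            (fun r => 3 ≤ r.2 ∧ limitOkB limit r.1 = true)).map (·.1)))
          (fun x => x) false := by
  rw [getTriosA_def]
  apply sortedSet_eq _ _ (nodup_triosFoldA hand lp) (PySem.Set.nodup_ofList _)
  intro w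
  rw [mem_triosFoldA]
  have hbridge := hasTrio_decodeR w (runsB hand) (properR_runsB hand)
  rw [decodeR_runsB] at hbridge
  rw [hbridge, h w]
  rw [PySem.Set.mem_ofList]
  simp only [List.mem_map, List.mem_filter, decide_eq_true_eq]
  constructor
  · rintro ⟨⟨r, hr, rfl, h3⟩, hok⟩
    exact ⟨r, ⟨hr, h3, hok⟩, rfl⟩
  · rintro ⟨r, ⟨hr, h3, hok⟩, rfl⟩
    exact ⟨⟨r, hr, rfl, h3⟩, hok⟩

lemma pairs_eq (hand : List Int) (v : Int) :
    getPairsA (removeFromHandA hand [v, v, v]) none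
      = PySem.List.sorted
          (PySem.Set.ofList (((drop3B (runsB hand) v).filter
            (fun r => 2 ≤ r.2)).map (·.1)))
          (fun x => x) false := by
  rw [removeFromHandA_eq, getPairsA_none]
  apply sortedSet_eq _ _ (nodup_pairsFoldA _) (PySem.Set.nodup_ofList _)
  intro w
  rw [mem_pairsFoldA]
  have hbridge := hasPair_decodeR w (drop3B (runsB hand) v) (properR_drop3B hand v)
  rw [decodeR_drop3B] at hbridge
  rw [hbridge, PySem.Set.mem_ofList]
  simp only [List.mem_map, List.mem_filter, decide_eq_true_eq]
  constructor
  · rintro ⟨r, hr, rfl, h2⟩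
    exact ⟨r, ⟨hr, h2⟩, rfl⟩
  · rintro ⟨r, ⟨hr, h2⟩, rfl⟩
    exact ⟨r, hr, rfl, h2⟩

lemma outer_fold_eq (hand : List Int) (trios : List Int) :
    trios.foldl
      (fun trioSolo v =>
        (getPairsA (removeFromHandA hand [v, v, v]) none).foldl
          (fun acc p => acc ++ [[v, v, v, p, p]]) trioSolo) []
    = trios.foldl
      (fun result v =>
        result ++
          (PySem.List.sorted
            (PySem.Set.ofList (((drop3B (runsB hand) v).filter
              (fun r => 2 ≤ r.2)).map (·.1)))
            (fun x => x) false).map (fun p => [v, v, v, p, p])) [] := by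
  apply PySem.List.foldl_congr_mem
  intro a v _
  rw [PySem.List.foldl_append_singleton_eq_map, pairs_eq]

theorem getTrioPairs_eq (hand : List Int) (lastPlay : Option (List Int)) :
    getTrioPairs hand lastPlay = getTrioPairs_alt hand lastPlay := by
  rcases lastPlay with _ | ⟨_ | ⟨h0, t0⟩⟩
  · show (getTriosA hand none).foldl _ [] = _
    rw [trios_eq hand none none (fun w => rfl), outer_fold_eq]
    rfl
  · show (getTriosA hand none).foldl _ [] = _
    rw [trios_eq hand none none (fun w => rfl), outer_fold_eq]
    rfl
  · show (getTriosA hand (some (PySem.List.slice (h0 :: t0) (some 0) (some 3)))).foldl _ [] = _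
    have hsl : PySem.List.slice (h0 :: t0) (some 0) (some 3) = h0 :: t0.take 2 := by
      rw [PySem.List.slice_zero_start, PySem.List.slice_to _ (by norm_num)]
      rfl
    rw [hsl, trios_eq hand (some (h0 :: t0.take 2)) (some h0) (fun w => rfl), outer_fold_eq]
    rfl

-- ===== VERDICT (by name: the statement is the Claim_ definition above) =====
theorem getTrioPairs_spec : Claim_equal_getTrioPairs := by
  intro hand lastPlay _
  unfold Spec_getTrioPairs
  exact getTrioPairs_eq hand lastPlay
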